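-- pv_equiv track=rewrite | github.com/eXzacT/AOC | 2022/python/day-07/src/part1.py | part1_v2
-- ===== SOURCE A (Python) =====
-- from itertools import accumulate
-- from collections import defaultdict
--
-- def part1_v2(data: list[str]) -> int:
--     '''4HbQ on reddit, beautiful solution!'''
--     dirs = defaultdict(int)
--
--     for line in data:
--         match line.split():
--             case '$', 'cd', '/': curr = ['/']
--             case '$', 'cd', '..': curr.pop()
--             case '$', 'cd', x: curr.append(x+'/')
--             case '$', 'ls': pass
--             case 'dir', _: pass
--             case size, _:
--                 for p in accumulate(curr):
--                     dirs[p] += int(size)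
--
--     return sum(size for size in dirs.values() if size <= 100_000)
-- ===== SOURCE B (Python) =====
-- def part1_v2(data: list[str]) -> int:
--     # One pass with a chain of open directory frames (path, own-accumulated size, parent):
--     # a file size is added ONLY to the innermost frame; closing a frame credits its total
--     # into `totals` under its full path and propagates the total to the parent frame.
--     totals = {}
--     top = None  # innermost open frame: [path, acc, parent-frame or None]
--
--     def close(frame):
--         path, acc, parent = frame
--         totals[path] = totals.get(path, 0) + acc
--         if parent is not None:
--             parent[1] += acc
--         return parent
--
--     for line in data:
--         t = line.split()
--         if t[:2] == ['$', 'cd'] and len(t) == 3: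
--             x = t[2]
--             if x == '/':
--                 while top is not None:
--                     top = close(top)
--                 top = ['/', 0, None]
--             elif x == '..':
--                 if top is not None:
--                     top = close(top)
--             else:
--                 top = [(top[0] if top is not None else '') + x + '/', 0, top]
--         elif len(t) == 2 and t != ['$', 'ls'] and t[0] != 'dir' and top is not None:
--             top[1] += int(t[0])
--
--     while top is not None:
--         top = close(top)
--     return sum(v for v in totals.values() if v <= 100000)
-- ===== Notes on version B (the rewrite author's own statement) =====
-- stated objective: alternative
-- what changed: A updates one path-keyed defaultdict entry per ancestor on every file line (via itertools.accumulate); B keeps a chain of open directory frames, adds each file size once to the innermost frame, and credits a frame's total to its full path (propagating it to the parent) only when the frame is closed, so the per-line inner loop over all ancestors disappears.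
import Mathlib
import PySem

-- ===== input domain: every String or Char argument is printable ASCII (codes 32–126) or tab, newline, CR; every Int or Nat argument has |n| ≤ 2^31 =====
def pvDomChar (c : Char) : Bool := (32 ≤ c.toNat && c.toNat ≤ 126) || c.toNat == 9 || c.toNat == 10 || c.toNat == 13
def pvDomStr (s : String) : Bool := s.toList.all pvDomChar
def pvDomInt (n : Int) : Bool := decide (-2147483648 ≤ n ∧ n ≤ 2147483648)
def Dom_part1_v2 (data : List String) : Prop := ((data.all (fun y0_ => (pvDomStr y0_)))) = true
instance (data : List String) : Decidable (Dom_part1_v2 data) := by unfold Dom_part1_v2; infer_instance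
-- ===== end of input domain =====

-- B replaces A's per-file update of every ancestor's path-keyed defaultdict entry by a chain of
-- open directory frames: a file size is added once to the innermost frame, and a frame's total is
-- credited to its full path (and propagated to its parent) only when the frame is closed.

-- ===== PORT A =====
-- itertools.accumulate on a list of strings (running concatenations)
def pvAccum (a : String) : List String → List String
  | [] => [a]
  | h :: t => a :: pvAccum (a ++ h) t

def pvAccumulate : List String → List String
  | [] => []
  | h :: t => pvAccum h t

-- the body of A's `for line in data` applied to the already-split tokens t (the match-case chain,
-- branches in Python's order).  A's state: `curr` (none before any '$ cd /': there Python raises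
-- NameError on the branches that read curr — those inputs are outside Pre_) and the dict `dirs`.
def pvStepAT (st : Option (List String) × PySem.Dict String Int) (t : List String) :
    Option (List String) × PySem.Dict String Int :=
  if t = ["$", "cd", "/"] then (some ["/"], st.2)
  else if t = ["$", "cd", ".."] then (st.1.map List.dropLast, st.2)
  else if t.length = 3 ∧ t.take 2 = ["$", "cd"] then
    (st.1.map (fun c => c ++ [t.getD 2 "" ++ "/"]), st.2)
  else if t = ["$", "ls"] then st
  else if t.length = 2 ∧ t.getD 0 "" = "dir" then st
  else if t.length = 2 then
    match st.1, PySem.Int.ofStr? (t.getD 0 "") with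
    | some cur, some sz =>
        (some cur, (pvAccumulate cur).foldl (fun d p => d.insert p (d.getD p 0 + sz)) st.2)
    | _, _ => st
  else st

def pvStepA (st : Option (List String) × PySem.Dict String Int) (line : String) :
    Option (List String) × PySem.Dict String Int :=
  pvStepAT st (PySem.Str.split₀ line)

def part1_v2 (data : List String) : Int :=
  let fin := data.foldl pvStepA (none, PySem.Dict.empty)
  ((fin.2.values.filter (fun v => decide (v ≤ 100000)))).sum

-- ===== PORT B =====
-- Source B's `top`: the chain of open frames [path, acc, parent], innermost first (None = nil).
inductive PvChain where
  | nil : PvChain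
  | frame : String → Int → PvChain → PvChain
deriving DecidableEq, Repr

def PvChain.depth : PvChain → Nat
  | .nil => 0
  | .frame _ _ r => r.depth + 1

-- Source B's close(frame): credit the frame's total into `totals` under its path, add it to the
-- parent's acc, return (new totals, parent).  Only ever called on a non-nil chain.
def pvClose (tot : PySem.Dict String Int) : PvChain → PySem.Dict String Int × PvChain
  | .nil => (tot, .nil)
  | .frame p a parent =>
    let tot' := tot.insert p (tot.getD p 0 + a)
    match parent with
    | .nil => (tot', .nil)
    | .frame pp pa r => (tot', .frame pp (pa + a) r)

-- Source B's `while top is not None: top = close(top)`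
def pvFlush (tot : PySem.Dict String Int) (c : PvChain) : PySem.Dict String Int :=
  match c with
  | .nil => tot
  | .frame p a .nil => tot.insert p (tot.getD p 0 + a)
  | .frame p a (.frame pp pa r) =>
      pvFlush (tot.insert p (tot.getD p 0 + a)) (PvChain.frame pp (pa + a) r)
termination_by c.depth
decreasing_by simp [PvChain.depth]

-- the body of Source B's `for line in data` applied to the split tokens t
def pvStepBT (st : PySem.Dict String Int × PvChain) (t : List String) :
    PySem.Dict String Int × PvChain :=
  if t.take 2 = ["$", "cd"] ∧ t.length = 3 then
    let x := t.getD 2 ""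
    if x = "/" then (pvFlush st.1 st.2, .frame "/" 0 .nil)
    else if x = ".." then
      match st.2 with
      | .nil => st
      | c => pvClose st.1 c
    else
      let parentPath := match st.2 with | .nil => "" | .frame p _ _ => p
      (st.1, .frame (parentPath ++ x ++ "/") 0 st.2)
  else if t.length = 2 ∧ ¬ t = ["$", "ls"] ∧ ¬ t.getD 0 "" = "dir" then
    -- `top[1] += int(t[0])` guarded by `top is not None`; int() failing with a frame open
    -- is Python's ValueError, outside Pre_
    match st.2, PySem.Int.ofStr? (t.getD 0 "") with
    | .frame p a r, some sz => (st.1, .frame p (a + sz) r)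
    | _, _ => st
  else st

def pvStepB (st : PySem.Dict String Int × PvChain) (line : String) :
    PySem.Dict String Int × PvChain :=
  pvStepBT st (PySem.Str.split₀ line)

def part1_v2_alt (data : List String) : Int :=
  let fin := data.foldl pvStepB (PySem.Dict.empty, .nil)
  (((pvFlush fin.1 fin.2).values.filter (fun v => decide (v ≤ 100000)))).sum

-- ===== PRECONDITION & SPEC =====
-- Pre_ admits exactly the traces on which Python A returns: it excludes only A's crashes —
-- a '$ cd x' / '$ cd ..' / file line before any '$ cd /' (NameError on the undefined curr),
-- '$ cd ..' when curr is already empty (IndexError on pop), and a file line with a size token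
-- int() rejects while curr is nonempty (ValueError; with curr empty A never evaluates int).
-- The scan tracks only A's (curr defined?, len(curr)) through the lines.
def pvPreScan : List String → Bool → Nat → Bool
  | [], _, _ => true
  | line :: rest, started, depth =>
    let t := PySem.Str.split₀ line
    if t = ["$", "cd", "/"] then pvPreScan rest true 1
    else if t = ["$", "cd", ".."] then
      started && decide (1 ≤ depth) && pvPreScan rest started (depth - 1)
    else if t.length = 3 ∧ t.take 2 = ["$", "cd"] then
      started && pvPreScan rest started (depth + 1)
    else if t = ["$", "ls"] then pvPreScan rest started depth
    else if t.length = 2 ∧ t.getD 0 "" = "dir" then pvPreScan rest started depth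
    else if t.length = 2 then
      (started && (decide (depth = 0) || (PySem.Int.ofStr? (t.getD 0 "")).isSome)) &&
        pvPreScan rest started depth
    else pvPreScan rest started depth

def Pre_part1_v2 (data : List String) : Prop := pvPreScan data false 0 = true
instance (data : List String) : Decidable (Pre_part1_v2 data) := by unfold Pre_part1_v2; infer_instance

def pvWitness_part1_v2 : List String :=
  ["$ cd /", "$ ls", "dir a", "100 b.txt", "$ cd a", "99900 c.txt", "$ cd ..", "$ cd a", "1 d"]

def Spec_part1_v2 (data : List String) (out : Int) : Prop := out = part1_v2_alt data
instance (data : List String) (out : Int) : Decidable (Spec_part1_v2 data out) := by unfold Spec_part1_v2; infer_instance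

-- ===== CLAIM (what is proved, stated in full; the proofs are below) =====
def Claim_equal_part1_v2 : Prop := ∀ (data : List String), Dom_part1_v2 data → Pre_part1_v2 data → Spec_part1_v2 data (part1_v2 data)

-- ===== LEMMAS AND PROOFS =====

-- the full paths of the open frames, innermost first
def pvChainPaths : PvChain → List String
  | .nil => []
  | .frame p _ r => p :: pvChainPaths r

-- pending credit of the chain at key p, given that `extra` has already been accumulated above it
def pvPend (extra : Int) : PvChain → String → Int
  | .nil, _ => 0
  | .frame q a r, p => (if q = p then extra + a else 0) + pvPend (extra + a) r p

def pvDepthOf : Option (List String) → Nat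
  | none => 0
  | some c => c.length

-- the loop invariant tying A's (curr, dirs) to B's (totals, chain)
def pvInv (a : Option (List String) × PySem.Dict String Int)
    (b : PySem.Dict String Int × PvChain) : Prop :=
  (∀ p, a.2.getD p 0 = b.1.getD p 0 + pvPend 0 b.2 p) ∧
  a.2.keys.Nodup ∧ b.1.keys.Nodup ∧
  (match a.1 with
   | none => b.2 = .nil
   | some c => pvChainPaths b.2 = (pvAccumulate c).reverse)


-- ---- scan unfolding helpers (proof-only) ----
def pvLineOK (t : List String) (started : Bool) (depth : Nat) : Bool :=
  if t = ["$", "cd", "/"] then true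
  else if t = ["$", "cd", ".."] then started && decide (1 ≤ depth)
  else if t.length = 3 ∧ t.take 2 = ["$", "cd"] then started
  else if t = ["$", "ls"] then true
  else if t.length = 2 ∧ t.getD 0 "" = "dir" then true
  else if t.length = 2 then started && (decide (depth = 0) || (PySem.Int.ofStr? (t.getD 0 "")).isSome)
  else true

def pvNextStarted (t : List String) (started : Bool) : Bool :=
  if t = ["$", "cd", "/"] then true else started

def pvNextDepth (t : List String) (depth : Nat) : Nat :=
  if t = ["$", "cd", "/"] then 1
  else if t = ["$", "cd", ".."] then depth - 1
  else if t.length = 3 ∧ t.take 2 = ["$", "cd"] then depth + 1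
  else depth

lemma pvPreScan_cons (line : String) (rest : List String) (s : Bool) (d : Nat) :
    pvPreScan (line :: rest) s d =
      (pvLineOK (PySem.Str.split₀ line) s d &&
        pvPreScan rest (pvNextStarted (PySem.Str.split₀ line) s)
          (pvNextDepth (PySem.Str.split₀ line) d)) := by
  simp only [pvPreScan, pvLineOK, pvNextStarted, pvNextDepth]
  split_ifs <;> simp_all

lemma pvAccum_ne_nil (a : String) (t : List String) : pvAccum a t ≠ [] := by
  cases t <;> simp [pvAccum]

lemma pvGetLastD_irrel (l : List String) (h : l ≠ []) (d d' : String) :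
    l.getLastD d = l.getLastD d' := by
  rcases List.eq_nil_or_concat l with rfl | ⟨l', a, rfl⟩
  · exact absurd rfl h
  · simp

lemma pvAccum_snoc (t : List String) (a y : String) :
    pvAccum a (t ++ [y]) = pvAccum a t ++ [(pvAccum a t).getLastD "" ++ y] := by
  induction t generalizing a with
  | nil => simp [pvAccum]
  | cons h t ih =>
    simp only [List.cons_append, pvAccum, ih, List.getLastD_cons]
    rw [pvGetLastD_irrel _ (pvAccum_ne_nil _ _) a ""]

lemma pvAccumulate_snoc (c : List String) (y : String) :
    pvAccumulate (c ++ [y]) = pvAccumulate c ++ [(pvAccumulate c).getLastD "" ++ y] := by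
  cases c with
  | nil => simp [pvAccumulate, pvAccum, String.empty_append]
  | cons h t => simp only [List.cons_append, pvAccumulate, pvAccum_snoc]

lemma pvAccumulate_ne_nil (c : List String) (h : c ≠ []) : pvAccumulate c ≠ [] := by
  cases c with
  | nil => exact absurd rfl h
  | cons a t => exact pvAccum_ne_nil a t

lemma pvAccumulate_dropLast (c : List String) :
    pvAccumulate c.dropLast = (pvAccumulate c).dropLast := by
  rcases List.eq_nil_or_concat c with rfl | ⟨c', y, rfl⟩
  · simp [pvAccumulate]
  · simp [pvAccumulate_snoc]

lemma pvGetD_foldl_insert_add (L : List String) (d : PySem.Dict String Int) (sz p : _) :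
    (L.foldl (fun d q => d.insert q (d.getD q 0 + sz)) d).getD p 0
      = d.getD p 0 + sz * (L.count p : Int) := by
  induction L generalizing d with
  | nil => simp
  | cons q L ih =>
    rw [List.foldl_cons, ih, PySem.Dict.getD_insert, List.count_cons]
    by_cases h : p = q
    · simp [h]; ring
    · simp [h]; exact Or.inl (fun hq => h hq.symm)

lemma pvPend_shift (c : PvChain) (e s : Int) (p : String) :
    pvPend (e + s) c p = pvPend e c p + s * ((pvChainPaths c).count p : Int) := by
  induction c generalizing e with
  | nil => simp [pvPend, pvChainPaths]
  | frame q a r ih =>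
    simp only [pvPend, pvChainPaths, List.count_cons]
    have h1 : e + s + a = (e + a) + s := by ring
    rw [h1, ih]
    by_cases h : q = p
    · simp [h]; ring
    · have h2 : ¬ (p = q) := fun hq => h hq.symm
      simp [h, h2]

lemma pvClose_pend (tot : PySem.Dict String Int) (p0 : String) (a0 : Int) (r : PvChain) (p : String) :
    (pvClose tot (.frame p0 a0 r)).1.getD p 0 + pvPend 0 (pvClose tot (.frame p0 a0 r)).2 p
      = tot.getD p 0 + pvPend 0 (.frame p0 a0 r) p := by
  cases r with
  | nil =>
    simp only [pvClose, pvPend, PySem.Dict.getD_insert]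
    split_ifs <;> simp_all
  | frame pp pa rr =>
    simp only [pvClose, pvPend, PySem.Dict.getD_insert]
    have h1 : (0 : Int) + (pa + a0) = (0 + a0) + pa := by ring
    rw [h1]
    split_ifs <;> simp_all <;> ring

lemma pvClose_paths (tot : PySem.Dict String Int) (p0 : String) (a0 : Int) (r : PvChain) :
    pvChainPaths (pvClose tot (.frame p0 a0 r)).2 = pvChainPaths r := by
  cases r <;> simp [pvClose, pvChainPaths]

lemma pvClose_nodup (tot : PySem.Dict String Int) (c : PvChain) (h : tot.keys.Nodup) :
    (pvClose tot c).1.keys.Nodup := by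
  cases c with
  | nil => exact h
  | frame p a r => cases r <;> exact PySem.Dict.nodup_keys_insert _ _ _ h

lemma pvFlush_getD (tot : PySem.Dict String Int) (c : PvChain) (p : String) :
    (pvFlush tot c).getD p 0 = tot.getD p 0 + pvPend 0 c p := by
  induction tot, c using pvFlush.induct with
  | case1 tot => simp [pvFlush.eq_1, pvPend]
  | case2 tot q a =>
    rw [pvFlush.eq_2]
    simp only [pvPend, PySem.Dict.getD_insert]
    split_ifs <;> simp_all
  | case3 tot q a pp pa r ih =>
    rw [pvFlush.eq_3, ih]
    simp only [pvPend, PySem.Dict.getD_insert]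
    have h1 : (0 : Int) + (pa + a) = (0 + a) + pa := by ring
    rw [h1]
    by_cases hq : p = q
    · subst hq
      by_cases hp : pp = p <;> simp [hp] <;> ring
    · have hq' : ¬ q = p := fun e => hq e.symm
      by_cases hp : pp = p <;> simp [hq, hq', hp] <;> ring

lemma pvFlush_nodup (tot : PySem.Dict String Int) (c : PvChain) (h : tot.keys.Nodup) :
    (pvFlush tot c).keys.Nodup := by
  induction tot, c using pvFlush.induct with
  | case1 tot => rw [pvFlush.eq_1]; exact h
  | case2 tot q a => rw [pvFlush.eq_2]; exact PySem.Dict.nodup_keys_insert _ _ _ h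
  | case3 tot q a pp pa r ih => rw [pvFlush.eq_3]; exact ih (PySem.Dict.nodup_keys_insert _ _ _ h)

lemma pvChainPaths_eq_nil (c : PvChain) (h : pvChainPaths c = []) : c = .nil := by
  cases c with
  | nil => rfl
  | frame p a r => simp [pvChainPaths] at h


lemma pvStep_ok (t : List String) (a : Option (List String) × PySem.Dict String Int)
    (b : PySem.Dict String Int × PvChain) (h : pvInv a b)
    (hok : pvLineOK t a.1.isSome (pvDepthOf a.1) = true) :
    pvInv (pvStepAT a t) (pvStepBT b t) ∧
    (pvStepAT a t).1.isSome = pvNextStarted t a.1.isSome ∧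
    pvDepthOf (pvStepAT a t).1 = pvNextDepth t (pvDepthOf a.1) := by
  obtain ⟨oc, dirs⟩ := a
  obtain ⟨tot, ch⟩ := b
  obtain ⟨hd, hka, hkb, hc⟩ := h
  by_cases h1 : t = ["$", "cd", "/"]
  -- '$ cd /'
  · subst h1
    have hA : pvStepAT (oc, dirs) ["$", "cd", "/"] = (some ["/"], dirs) := by
      simp [pvStepAT]
    have hB : pvStepBT (tot, ch) ["$", "cd", "/"] = (pvFlush tot ch, .frame "/" 0 .nil) := by
      simp [pvStepBT]
    rw [hA, hB]
    refine ⟨⟨?_, hka, pvFlush_nodup _ _ hkb, ?_⟩, by simp [pvNextStarted],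
      by simp [pvNextDepth, pvDepthOf]⟩
    · intro p
      rw [pvFlush_getD]
      simpa [pvPend] using hd p
    · show pvChainPaths (.frame "/" 0 .nil) = (pvAccumulate ["/"]).reverse
      simp [pvChainPaths, pvAccumulate, pvAccum]
  · by_cases h2 : t = ["$", "cd", ".."]
    -- '$ cd ..'
    · subst h2
      rcases oc with _ | c
      · exfalso; simp [pvLineOK] at hok
      simp [pvLineOK, pvDepthOf] at hok
      have hcne : c ≠ [] := by
        intro e; subst e; simp at hok
      obtain ⟨p0, a0, r, rfl⟩ : ∃ p0 a0 r, ch = PvChain.frame p0 a0 r := by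
        cases ch with
        | nil =>
          exfalso
          have hne := pvAccumulate_ne_nil c hcne
          have : pvChainPaths PvChain.nil = (pvAccumulate c).reverse := hc
          simp [pvChainPaths] at this
          exact hne (by simpa using this.symm)
        | frame p0 a0 r => exact ⟨p0, a0, r, rfl⟩
      have hA : pvStepAT (some c, dirs) ["$", "cd", ".."] = (some c.dropLast, dirs) := by
        simp [pvStepAT]
      have hB : pvStepBT (tot, PvChain.frame p0 a0 r) ["$", "cd", ".."]
          = pvClose tot (PvChain.frame p0 a0 r) := by
        simp [pvStepBT]
      rw [hA, hB]
      refine ⟨⟨?_, hka, pvClose_nodup _ _ hkb, ?_⟩, by simp [pvNextStarted],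
        by simp [pvNextDepth, pvDepthOf]⟩
      · intro p
        rw [pvClose_pend]
        exact hd p
      · show pvChainPaths (pvClose tot (PvChain.frame p0 a0 r)).2
            = (pvAccumulate c.dropLast).reverse
        rw [pvClose_paths, pvAccumulate_dropLast, ← List.tail_reverse, ← hc]
        simp [pvChainPaths]
    · by_cases h3 : t.length = 3 ∧ t.take 2 = ["$", "cd"]
      -- '$ cd x'
      · obtain ⟨hlen, htake⟩ := h3
        match t, hlen with
        | [t0, t1, t2], _ =>
        simp only [List.take, List.cons.injEq, and_true] at htake
        obtain ⟨rfl, rfl⟩ := htake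
        have ht2a : t2 ≠ "/" := by intro e; exact h1 (by rw [e])
        have ht2b : t2 ≠ ".." := by intro e; exact h2 (by rw [e])
        rcases oc with _ | c
        · exfalso; simp [pvLineOK, ht2a, ht2b] at hok
        have hA : pvStepAT (some c, dirs) ["$", "cd", t2]
            = (some (c ++ [t2 ++ "/"]), dirs) := by
          simp [pvStepAT, ht2a, ht2b]
        cases ch with
        | nil =>
          have hacc : pvAccumulate c = [] := by
            have : pvChainPaths PvChain.nil = (pvAccumulate c).reverse := hc
            simp [pvChainPaths] at this
            simpa using this.symm
          have hB : pvStepBT (tot, PvChain.nil) ["$", "cd", t2]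
              = (tot, .frame ("" ++ t2 ++ "/") 0 .nil) := by
            simp [pvStepBT, ht2a, ht2b]
          rw [hA, hB]
          refine ⟨⟨?_, hka, hkb, ?_⟩, by simp [pvNextStarted, ht2a],
            by simp [pvNextDepth, pvDepthOf, ht2a, ht2b]⟩
          · intro p
            simpa [pvPend] using hd p
          · show pvChainPaths (.frame ("" ++ t2 ++ "/") 0 .nil)
                = (pvAccumulate (c ++ [t2 ++ "/"])).reverse
            rw [pvAccumulate_snoc, hacc]
            simp [pvChainPaths, String.empty_append, String.append_assoc]
        | frame pp pa rr =>
          have hcc : pvChainPaths (PvChain.frame pp pa rr) = (pvAccumulate c).reverse := hc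
          have hacc : pvAccumulate c = (pvChainPaths rr).reverse ++ [pp] := by
            have := congrArg List.reverse hcc
            simpa [pvChainPaths] using this.symm
          have hB : pvStepBT (tot, PvChain.frame pp pa rr) ["$", "cd", t2]
              = (tot, .frame (pp ++ t2 ++ "/") 0 (PvChain.frame pp pa rr)) := by
            simp [pvStepBT, ht2a, ht2b]
          rw [hA, hB]
          refine ⟨⟨?_, hka, hkb, ?_⟩, by simp [pvNextStarted, ht2a],
            by simp [pvNextDepth, pvDepthOf, ht2a, ht2b]⟩
          · intro p
            simpa [pvPend] using hd p
          · show pvChainPaths (.frame (pp ++ t2 ++ "/") 0 (PvChain.frame pp pa rr))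
                = (pvAccumulate (c ++ [t2 ++ "/"])).reverse
            have hlast : (pvAccumulate c).getLastD "" = pp := by
              rw [hacc]; exact List.getLastD_concat
            rw [pvAccumulate_snoc, hlast]
            simp only [List.reverse_append, List.reverse_cons, List.reverse_nil,
              List.nil_append, List.singleton_append]
            rw [← hcc]
            simp [pvChainPaths, String.append_assoc]
      · by_cases h4 : t = ["$", "ls"]
        -- '$ ls'
        · subst h4
          have hA : pvStepAT (oc, dirs) ["$", "ls"] = (oc, dirs) := by
            simp [pvStepAT]
          have hB : pvStepBT (tot, ch) ["$", "ls"] = (tot, ch) := by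
            simp [pvStepBT]
          rw [hA, hB]
          exact ⟨⟨hd, hka, hkb, hc⟩, by simp [pvNextStarted], by simp [pvNextDepth]⟩
        · by_cases h5 : t.length = 2 ∧ t.getD 0 "" = "dir"
          -- 'dir x'
          · obtain ⟨hlen, hdir⟩ := h5
            match t, hlen with
            | [t0, t1], _ =>
            have ht0 : t0 = "dir" := by simpa using hdir
            subst ht0
            have hA : pvStepAT (oc, dirs) ["dir", t1] = (oc, dirs) := by
              simp [pvStepAT]
            have hB : pvStepBT (tot, ch) ["dir", t1] = (tot, ch) := by
              simp [pvStepBT]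
            rw [hA, hB]
            exact ⟨⟨hd, hka, hkb, hc⟩, by simp [pvNextStarted], by simp [pvNextDepth]⟩
          · by_cases h6 : t.length = 2
            -- 'size name' (a file line)
            · match t, h6 with
              | [t0, t1], _ =>
              have ht0 : ¬ t0 = "dir" := fun e => h5 ⟨rfl, by simpa using e⟩
              rcases oc with _ | c
              · exfalso; simp [pvLineOK, h1, h2, h3, h4, ht0] at hok
              simp [pvLineOK, h1, h2, h3, h4, h5, pvDepthOf,
                Option.isSome_iff_exists] at hok
              by_cases hcnil : c = []
              · subst hcnil
                have hch : ch = PvChain.nil := by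
                  apply pvChainPaths_eq_nil
                  have : pvChainPaths ch = (pvAccumulate []).reverse := hc
                  simpa [pvAccumulate] using this
                subst hch
                have hA : pvStepAT (some [], dirs) [t0, t1] = (some [], dirs) := by
                  cases hp : PySem.Int.ofStr? t0 <;>
                    simp [pvStepAT, h1, h2, h3, h4, ht0, hp, pvAccumulate]
                have hB : pvStepBT (tot, PvChain.nil) [t0, t1] = (tot, PvChain.nil) := by
                  cases hp : PySem.Int.ofStr? t0 <;> simp [pvStepBT, h4, ht0, hp]
                rw [hA, hB]
                exact ⟨⟨hd, hka, hkb, hc⟩, by simp [pvNextStarted, h1],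
                  by simp only [pvNextDepth, if_neg h1, if_neg h2, if_neg h3]⟩
              · obtain ⟨sz, hsz⟩ : ∃ sz, PySem.Int.ofStr? t0 = some sz := by
                  rcases hok with hz | hz | hp
                  · exact absurd hz ht0
                  · exact absurd hz hcnil
                  · exact hp
                obtain ⟨p0, a0, r, rfl⟩ : ∃ p0 a0 r, ch = PvChain.frame p0 a0 r := by
                  cases ch with
                  | nil =>
                    exfalso
                    have hne := pvAccumulate_ne_nil c hcnil
                    have : pvChainPaths PvChain.nil = (pvAccumulate c).reverse := hc
                    simp [pvChainPaths] at this
                    exact hne (by simpa using this.symm)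
                  | frame p0 a0 r => exact ⟨p0, a0, r, rfl⟩
                have hA : pvStepAT (some c, dirs) [t0, t1]
                    = (some c, (pvAccumulate c).foldl
                        (fun d p => d.insert p (d.getD p 0 + sz)) dirs) := by
                  simp [pvStepAT, h1, h2, h3, h4, ht0, hsz]
                have hB : pvStepBT (tot, PvChain.frame p0 a0 r) [t0, t1]
                    = (tot, PvChain.frame p0 (a0 + sz) r) := by
                  simp [pvStepBT, h4, ht0, hsz]
                rw [hA, hB]
                refine ⟨⟨?_, PySem.Dict.nodup_keys_foldl_insert _ _ _ hka, hkb, ?_⟩,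
                  by simp [pvNextStarted, h1],
                  by simp only [pvNextDepth, if_neg h1, if_neg h2, if_neg h3]⟩
                · intro p
                  rw [pvGetD_foldl_insert_add, hd p]
                  have hcc : pvChainPaths (PvChain.frame p0 a0 r) = (pvAccumulate c).reverse := hc
                  have hcount : ((pvAccumulate c).count p : Int)
                      = ((p0 :: pvChainPaths r).count p : Int) := by
                    have h' : (pvAccumulate c).count p = (p0 :: pvChainPaths r).count p := by
                      have := congrArg (fun l => List.count p l) hcc
                      simpa [List.count_reverse, pvChainPaths] using this.symm
                    exact_mod_cast h'
                  rw [hcount]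
                  simp only [pvPend, List.count_cons]
                  have e1 : (0 : Int) + (a0 + sz) = (0 + a0) + sz := by ring
                  have hshift := pvPend_shift r (0 + a0) sz p
                  rw [e1, hshift]
                  by_cases hp0 : p0 = p
                  · have hp0' : (p == p0) = true := by simp [hp0]
                    simp [hp0, hp0']; push_cast; ring
                  · have hp0' : ¬ p = p0 := fun e => hp0 e.symm
                    simp [hp0, hp0']; ring
                · show pvChainPaths (PvChain.frame p0 (a0 + sz) r) = (pvAccumulate c).reverse
                  simpa [pvChainPaths] using hc
            -- anything else is a no-op line
            · have h3' : ¬ (t.take 2 = ["$", "cd"] ∧ t.length = 3) := fun ⟨x, y⟩ => h3 ⟨y, x⟩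
              have hA : pvStepAT (oc, dirs) t = (oc, dirs) := by
                simp [pvStepAT, h1, h2, h3, h4, h5, h6]
              have hB : pvStepBT (tot, ch) t = (tot, ch) := by
                simp [pvStepBT, h3', h6]
              rw [hA, hB]
              exact ⟨⟨hd, hka, hkb, hc⟩, by simp [pvNextStarted, h1],
                by simp only [pvNextDepth, if_neg h1, if_neg h2, if_neg h3]⟩

lemma pvLoop (data : List String) :
    ∀ (a : Option (List String) × PySem.Dict String Int)
      (b : PySem.Dict String Int × PvChain), pvInv a b →
      pvPreScan data a.1.isSome (pvDepthOf a.1) = true →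
      pvInv (data.foldl pvStepA a) (data.foldl pvStepB b) := by
  induction data with
  | nil => exact fun a b h _ => h
  | cons line rest ih =>
    intro a b h hscan
    rw [pvPreScan_cons, Bool.and_eq_true] at hscan
    obtain ⟨hok, hrest⟩ := hscan
    obtain ⟨hinv, hst, hdep⟩ := pvStep_ok (PySem.Str.split₀ line) a b h hok
    simp only [List.foldl_cons]
    refine ih (pvStepA a line) (pvStepB b line) hinv ?_
    rw [← hst, ← hdep] at hrest
    exact hrest

lemma pvSum_filter_map (l : List Int) :
    (l.filter (fun v => decide (v ≤ 100000))).sum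
      = (l.map (fun v => if v ≤ 100000 then v else 0)).sum := by
  induction l with
  | nil => rfl
  | cons x l ih => by_cases hx : x ≤ 100000 <;> simp [hx, ih]

lemma pvSum_dict (d : PySem.Dict String Int) (hnd : d.keys.Nodup) (K : Finset String)
    (hK : d.keys.toFinset ⊆ K) :
    (d.values.filter (fun v => decide (v ≤ 100000))).sum
      = ∑ k ∈ K, (if d.getD k 0 ≤ 100000 then d.getD k 0 else 0) := by
  rw [PySem.Dict.values_eq_map_keys d hnd 0, pvSum_filter_map, List.map_map,
    ← List.sum_toFinset _ hnd]
  apply Finset.sum_subset hK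
  intro x _ hx
  have hge : d.getD x 0 = 0 := by
    have hcont : d.contains x = false := by
      rw [PySem.Dict.contains_eq_decide_mem_keys]
      simpa using (by simpa [List.mem_toFinset] using hx : x ∉ d.keys)
    exact PySem.Dict.getD_of_not_contains _ _ hcont
  simp [Function.comp, hge]

theorem part1_v2_spec : Claim_equal_part1_v2 := by
  unfold Claim_equal_part1_v2
  intro data _ hpre
  unfold Spec_part1_v2
  simp only [part1_v2, part1_v2_alt]
  have h0 : pvInv (none, PySem.Dict.empty) (PySem.Dict.empty, PvChain.nil) := by
    refine ⟨fun p => by simp [pvPend], ?_, ?_, rfl⟩ <;>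
      simp [PySem.Dict.nodup_keys_empty]
  have hscan : pvPreScan data (none : Option (List String)).isSome (pvDepthOf none) = true := hpre
  obtain ⟨hdq, hka, hkb, -⟩ := pvLoop data _ _ h0 hscan
  have hT : ∀ p, (data.foldl pvStepA (none, PySem.Dict.empty)).2.getD p 0
      = (pvFlush (data.foldl pvStepB (PySem.Dict.empty, PvChain.nil)).1
          (data.foldl pvStepB (PySem.Dict.empty, PvChain.nil)).2).getD p 0 := by
    intro p; rw [pvFlush_getD]; exact hdq p
  have hTn : (pvFlush (data.foldl pvStepB (PySem.Dict.empty, PvChain.nil)).1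
      (data.foldl pvStepB (PySem.Dict.empty, PvChain.nil)).2).keys.Nodup :=
    pvFlush_nodup _ _ hkb
  rw [pvSum_dict _ hka ((data.foldl pvStepA (none, PySem.Dict.empty)).2.keys.toFinset ∪
        (pvFlush (data.foldl pvStepB (PySem.Dict.empty, PvChain.nil)).1
          (data.foldl pvStepB (PySem.Dict.empty, PvChain.nil)).2).keys.toFinset)
      Finset.subset_union_left,
    pvSum_dict _ hTn _ Finset.subset_union_right]
  exact Finset.sum_congr rfl (fun k _ => by rw [hT k])
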